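-- pv_equiv track=rewrite | github.com/dsocial118/SISOC | core/validators.py | _is_quoted_local_part
-- ===== SOURCE A (Python) =====
-- _QUOTED_TEXT_ALLOWED = (
--     (1, 8),
--     (11, 12),
--     (14, 31),
--     (33, 91),
--     (93, 127),
-- )
--
-- _QUOTED_ESCAPED_ALLOWED = (
--     (1, 9),
--     (11, 12),
--     (14, 127),
-- )
--
-- def _is_quoted_local_part(value):
--     if len(value) < 2 or value[0] != '"' or value[-1] != '"':
--         return False
--
--     inner = value[1:-1]
--     idx = 0
--     while idx < len(inner):
--         ch = inner[idx]
--         if ch == "\\":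
--             idx += 1
--             if idx >= len(inner):
--                 return False
--             code = ord(inner[idx])
--             if not any(start <= code <= end for start, end in _QUOTED_ESCAPED_ALLOWED):
--                 return False
--             idx += 1
--             continue
--
--         code = ord(ch)
--         if not any(start <= code <= end for start, end in _QUOTED_TEXT_ALLOWED):
--             return False
--         idx += 1
--
--     return True
-- ===== SOURCE B (Python) =====
-- def _text_ok(s):
--     return all(1 <= ord(c) <= 8 or 11 <= ord(c) <= 12 or 14 <= ord(c) <= 31
--                or 33 <= ord(c) <= 91 or 93 <= ord(c) <= 127 for c in s)
--
--
-- def _esc_ok(c):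
--     o = ord(c)
--     return 1 <= o <= 9 or 11 <= o <= 12 or 14 <= o <= 127
--
--
-- def _is_quoted_local_part(value):
--     if len(value) < 2 or value[0] != '"' or value[-1] != '"':
--         return False
--     segments = value[1:-1].split("\\")
--     # First segment is plain quoted text; every later segment follows a backslash.
--     if not _text_ok(segments[0]):
--         return False
--     i = 1
--     n = len(segments)
--     while i < n:
--         seg = segments[i]
--         if seg:
--             # backslash escapes seg[0]; the rest of the segment is plain text
--             if not _esc_ok(seg[0]) or not _text_ok(seg[1:]):
--                 return False
--             i += 1
--         else:
--             # empty segment: the backslash escapes the NEXT backslash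
--             if i == n - 1:
--                 return False  # dangling backslash at end of inner text
--             # escaped char is '\\' (code 92, always escapable); next segment is plain text
--             if not _text_ok(segments[i + 1]):
--                 return False
--             i += 2
--     return True
-- ===== Notes on version B (the rewrite author's own statement) =====
-- stated objective: alternative
-- what changed: B splits the inner text on backslashes once and then validates segments (first segment plain text; each later segment either an escaped char plus text, or empty meaning an escaped backslash consuming the following segment), instead of A's per-character index-skipping state loop.
import Mathlib
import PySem

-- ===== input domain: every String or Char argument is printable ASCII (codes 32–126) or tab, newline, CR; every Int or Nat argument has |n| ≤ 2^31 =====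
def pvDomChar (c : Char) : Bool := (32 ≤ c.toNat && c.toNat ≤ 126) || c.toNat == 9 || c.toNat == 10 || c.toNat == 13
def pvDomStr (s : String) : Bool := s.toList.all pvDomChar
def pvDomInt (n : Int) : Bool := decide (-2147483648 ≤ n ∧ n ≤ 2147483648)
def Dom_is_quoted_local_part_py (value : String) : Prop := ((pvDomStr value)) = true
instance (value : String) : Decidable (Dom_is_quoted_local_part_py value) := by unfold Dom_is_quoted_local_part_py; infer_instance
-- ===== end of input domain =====

-- B replaces A's per-character index-skipping loop by a split-on-backslash pass followed by
-- segment-wise validation; equal return values, no side effects.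
-- ===== PORT A =====
-- any(start <= code <= end for start, end in ranges)
def pvAnyRange (ranges : List (Nat × Nat)) (code : Nat) : Bool :=
  ranges.any (fun p => decide (p.1 ≤ code ∧ code ≤ p.2))

def pvQuotedTextAllowed : List (Nat × Nat) := [(1,8),(11,12),(14,31),(33,91),(93,127)]
def pvQuotedEscapedAllowed : List (Nat × Nat) := [(1,9),(11,12),(14,127)]

-- the while-loop of A: idx steps by 2 over a backslash, by 1 otherwise
def pvGoA : List Char → Bool
  | [] => true
  | c :: rest =>
    if c = '\\' then
      match rest with
      | [] => false
      | d :: rest' =>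
        if pvAnyRange pvQuotedEscapedAllowed d.toNat then pvGoA rest' else false
    else
      if pvAnyRange pvQuotedTextAllowed c.toNat then pvGoA rest else false

def is_quoted_local_part_py (value : String) : Bool :=
  let l := value.toList
  if l.length < 2 || PySem.List.pyGet? l 0 != some '"' || PySem.List.pyGet? l (-1) != some '"' then
    false
  else
    pvGoA (PySem.List.slice (PySem.List.slice l none (some (-1))) (some 1) none)  -- value[1:-1]

-- ===== PORT B =====
def pvEscOk (n : Nat) : Bool :=
  decide (1 ≤ n ∧ n ≤ 9) || decide (11 ≤ n ∧ n ≤ 12) || decide (14 ≤ n ∧ n ≤ 127)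
def pvTxtOk (n : Nat) : Bool :=
  decide (1 ≤ n ∧ n ≤ 8) || decide (11 ≤ n ∧ n ≤ 12) || decide (14 ≤ n ∧ n ≤ 31)
    || decide (33 ≤ n ∧ n ≤ 91) || decide (93 ≤ n ∧ n ≤ 127)

-- _text_ok: all characters are allowed quoted text
def pvTextOk (l : List Char) : Bool := l.all (fun c => pvTxtOk c.toNat)

-- inner.split("\\"): exact hand port of Python str.split with the one-character separator '\'
-- (split always yields at least one segment, so the result is head segment × later segments)
def pvSplitBS : List Char → List Char × List (List Char)
  | [] => ([], [])
  | c :: r =>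
    let (s, ss) := pvSplitBS r
    if c = '\\' then ([], s :: ss) else (c :: s, ss)

-- the while-loop of B over segments[1:]: nonempty segment = escaped char + text (i += 1);
-- empty segment = escaped backslash consuming the next segment as text (i += 2);
-- a final empty segment is a dangling backslash
def pvGoSegs : List (List Char) → Bool
  | [] => true
  | (c :: t) :: ss => if pvEscOk c.toNat && pvTextOk t then pvGoSegs ss else false
  | [] :: [] => false
  | [] :: nxt :: ss => if pvTextOk nxt then pvGoSegs ss else false

def is_quoted_local_part_py_alt (value : String) : Bool :=
  let l := value.toList
  if l.length < 2 || PySem.List.pyGet? l 0 != some '"' || PySem.List.pyGet? l (-1) != some '"' then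
    false
  else
    let (s0, segs) := pvSplitBS (PySem.List.slice (PySem.List.slice l none (some (-1))) (some 1) none)
    if pvTextOk s0 then pvGoSegs segs else false

-- ===== PRECONDITION & SPEC =====
def Spec_is_quoted_local_part_py (value : String) (out : Bool) : Prop := out = is_quoted_local_part_py_alt value
instance (value : String) (out : Bool) : Decidable (Spec_is_quoted_local_part_py value out) := by unfold Spec_is_quoted_local_part_py; infer_instance

-- ===== CLAIM (what is proved, stated in full; the proofs are below) =====
def Claim_equal_is_quoted_local_part_py : Prop := ∀ (value : String), Dom_is_quoted_local_part_py value → Spec_is_quoted_local_part_py value (is_quoted_local_part_py value)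

-- ===== LEMMAS AND PROOFS =====
theorem pvEsc_eq (n : Nat) : pvAnyRange pvQuotedEscapedAllowed n = pvEscOk n := by
  rw [Bool.eq_iff_iff]
  simp [pvAnyRange, pvQuotedEscapedAllowed, pvEscOk]
  tauto

theorem pvTxt_eq (n : Nat) : pvAnyRange pvQuotedTextAllowed n = pvTxtOk n := by
  rw [Bool.eq_iff_iff]
  simp [pvAnyRange, pvQuotedTextAllowed, pvTxtOk]
  tauto

theorem pvGo_eq (l : List Char) :
    pvGoA l = (if pvTextOk (pvSplitBS l).1 then pvGoSegs (pvSplitBS l).2 else false) := by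
  induction l using pvGoA.induct with
  | case1 => simp [pvGoA, pvSplitBS, pvTextOk, pvGoSegs]
  | case2 =>
    -- '\\'::[] : dangling backslash
    simp [pvGoA, pvSplitBS, pvTextOk, pvGoSegs]
  | case3 d r' hesc ih =>
    -- '\\'::d::r' with escape allowed
    by_cases hd : d = '\\'
    · subst hd
      simp_all [pvGoA, pvSplitBS, pvTextOk, pvGoSegs, pvEsc_eq, pvEscOk]
    · simp_all [pvGoA, pvSplitBS, pvTextOk, pvGoSegs, pvEsc_eq]
  | case4 d r' hesc =>
    have hd : d ≠ '\\' := by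
      intro h; subst h; rw [pvEsc_eq] at hesc; simp [pvEscOk] at hesc
    simp_all [pvGoA, pvSplitBS, pvTextOk, pvGoSegs, pvEsc_eq]
  | case5 c r hc htxt ih =>
    rw [pvGoA.eq_def]
    simp_all [pvSplitBS, pvTextOk, pvTxt_eq]
  | case6 c r hc htxt =>
    rw [pvGoA.eq_def]
    simp_all [pvSplitBS, pvTextOk, pvTxt_eq]

-- ===== VERDICT (by name: the statement is the Claim_ definition above) =====
theorem is_quoted_local_part_py_spec : Claim_equal_is_quoted_local_part_py := by
  intro value _
  unfold Spec_is_quoted_local_part_py is_quoted_local_part_py is_quoted_local_part_py_alt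
  simp only []
  split
  · rfl
  · exact pvGo_eq _
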